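-- pv_equiv track=rewrite | github.com/Troppo99/VISUALAI | website-django/five_s/src/play/bcd_play.py | distribute_cameras
-- ===== SOURCE A (Python) =====
-- def distribute_cameras(all_cameras, pcs, special_pc="PC-8"):
--     total_cameras = len(all_cameras)
--     total_pcs = len(pcs)
--
--     base = total_cameras // total_pcs
--     remainder = total_cameras % total_pcs
--
--     camera_distribution = {pc: base for pc in pcs}
--
--     non_special_pcs = [pc for pc in pcs if pc != special_pc]
--
--     for i in range(remainder):
--         pc = non_special_pcs[i % len(non_special_pcs)]
--         camera_distribution[pc] += 1
--
--     return camera_distribution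
-- ===== SOURCE B (Python) =====
-- def distribute_cameras(all_cameras, pcs, special_pc="PC-8"):
--     base, remainder = divmod(len(all_cameras), len(pcs))
--     non_special = [pc for pc in pcs if pc != special_pc]
--     if remainder:
--         q, r = divmod(remainder, len(non_special))
--         head = non_special[:r]
--         return {pc: base + q * non_special.count(pc) + head.count(pc) for pc in pcs}
--     return {pc: base for pc in pcs}
-- ===== Notes on version B (the rewrite author's own statement) =====
-- stated objective: simpler
-- what changed: Replaces the remainder-many round-robin dict-increment loop with a direct per-key closed form: each PC's final count is base + q*count(pc in non_special) + count(pc in first r non-special entries) with q, r = divmod(remainder, len(non_special)), so the dict is built in one comprehension with no mutation.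
import Mathlib
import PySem

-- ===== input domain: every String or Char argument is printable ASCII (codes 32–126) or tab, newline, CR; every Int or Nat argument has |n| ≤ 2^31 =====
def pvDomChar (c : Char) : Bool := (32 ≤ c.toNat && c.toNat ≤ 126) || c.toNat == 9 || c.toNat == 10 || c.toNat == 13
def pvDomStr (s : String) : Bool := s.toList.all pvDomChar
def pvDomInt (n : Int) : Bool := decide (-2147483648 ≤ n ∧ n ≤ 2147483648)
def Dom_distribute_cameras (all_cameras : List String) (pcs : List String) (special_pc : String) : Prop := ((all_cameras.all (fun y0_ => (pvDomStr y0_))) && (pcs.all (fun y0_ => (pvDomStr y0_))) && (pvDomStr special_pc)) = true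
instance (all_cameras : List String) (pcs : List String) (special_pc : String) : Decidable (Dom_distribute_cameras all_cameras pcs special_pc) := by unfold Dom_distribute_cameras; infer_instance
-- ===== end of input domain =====

-- B replaces A's remainder-many round-robin increment loop by a per-key closed form: each PC's final count is computed directly from divmod and list counts, so the dict is built in one comprehension with no mutation (objective: simpler).


-- ===== PORT A =====
def distribute_cameras (all_cameras : List String) (pcs : List String) (special_pc : String) : List (String × Int) :=
  let total_cameras : Int := all_cameras.length
  let total_pcs : Int := pcs.length
  let base : Int := PySem.Int.floordiv total_cameras total_pcs
  let remainder : Int := PySem.Int.mod total_cameras total_pcs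
  let camera_distribution : PySem.Dict String Int :=
    pcs.foldl (fun d pc => d.insert pc base) PySem.Dict.empty
  let non_special_pcs : List String := pcs.filter (fun pc => pc != special_pc)
  let final : PySem.Dict String Int :=
    (PySem.List.pyRange 0 remainder 1).foldl (fun d i =>
      let pc := PySem.List.pyGetD non_special_pcs (PySem.Int.mod i (PySem.List.len non_special_pcs)) ""
      d.modify pc 0 (· + 1)) camera_distribution
  final.items

-- ===== PORT B =====
def distribute_cameras_alt (all_cameras : List String) (pcs : List String) (special_pc : String) : List (String × Int) :=
  let base : Int := PySem.Int.floordiv all_cameras.length pcs.length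
  let remainder : Int := PySem.Int.mod all_cameras.length pcs.length
  let non_special : List String := pcs.filter (fun pc => pc != special_pc)
  if remainder ≠ 0 then
    let q : Int := PySem.Int.floordiv remainder (PySem.List.len non_special)
    let r : Int := PySem.Int.mod remainder (PySem.List.len non_special)
    let head : List String := PySem.List.slice non_special none (some r)
    (pcs.foldl (fun d pc => d.insert pc
        (base + q * (PySem.List.count non_special pc : Int) + (PySem.List.count head pc : Int)))
      PySem.Dict.empty).items
  else
    (pcs.foldl (fun d pc => d.insert pc base) PySem.Dict.empty).items

-- ===== PRECONDITION & SPEC =====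
-- Pre_ excludes exactly the inputs where Python A raises: pcs == [] (ZeroDivisionError), and
-- remainder > 0 with no non-special PC (ZeroDivisionError/IndexError in the loop).
def Pre_distribute_cameras (all_cameras : List String) (pcs : List String) (special_pc : String) : Prop :=
  pcs ≠ [] ∧ (PySem.Int.mod (all_cameras.length : Int) (pcs.length : Int) = 0 ∨
              pcs.filter (fun pc => pc != special_pc) ≠ [])
instance (all_cameras : List String) (pcs : List String) (special_pc : String) : Decidable (Pre_distribute_cameras all_cameras pcs special_pc) := by unfold Pre_distribute_cameras; infer_instance
def pvWitness_distribute_cameras : List String × List String × String := (["c1", "c2", "c3"], ["PC-1", "PC-2"], "PC-8")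
def Spec_distribute_cameras (all_cameras : List String) (pcs : List String) (special_pc : String) (out : List (String × Int)) : Prop := out = distribute_cameras_alt all_cameras pcs special_pc
instance (all_cameras : List String) (pcs : List String) (special_pc : String) (out : List (String × Int)) : Decidable (Spec_distribute_cameras all_cameras pcs special_pc out) := by unfold Spec_distribute_cameras; infer_instance

-- ===== CLAIM (what is proved, stated in full; the proofs are below) =====
def Claim_equal_distribute_cameras : Prop := ∀ (all_cameras : List String) (pcs : List String) (special_pc : String), Dom_distribute_cameras all_cameras pcs special_pc → Pre_distribute_cameras all_cameras pcs special_pc → Spec_distribute_cameras all_cameras pcs special_pc (distribute_cameras all_cameras pcs special_pc)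

-- ===== LEMMAS AND PROOFS =====

theorem pv_map_getD_range (xs : List String) (n : Nat) (hn : n ≤ xs.length) :
    (List.range n).map (fun t => xs.getD t "") = xs.take n := by
  apply List.ext_getElem
  · simp [hn]
  · intro i h1 h2
    simp at h1 ⊢
    rw [List.getElem?_eq_getElem (by omega)]
    rfl

theorem pv_count_cycles (xs : List String) (q r : Nat) (hr : r ≤ xs.length) (k : String) :
    ((List.range (q * xs.length + r)).map (fun t => xs.getD (t % xs.length) "")).count k
      = q * xs.count k + (xs.take r).count k := by
  induction q with
  | zero =>
    have h : ∀ t ∈ List.range r, xs.getD (t % xs.length) "" = xs.getD t "" := by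
      intro t ht; simp at ht; rw [Nat.mod_eq_of_lt (by omega)]
    rw [Nat.zero_mul, Nat.zero_add, List.map_congr_left h, pv_map_getD_range xs r hr]
    simp
  | succ q ih =>
    have hsplit : (q + 1) * xs.length + r = xs.length + (q * xs.length + r) := by ring
    rw [hsplit, List.range_add, List.map_append, List.count_append, List.map_map]
    have h1 : ∀ t ∈ List.range xs.length, xs.getD (t % xs.length) "" = xs.getD t "" := by
      intro t ht; simp at ht; rw [Nat.mod_eq_of_lt ht]
    rw [List.map_congr_left h1, pv_map_getD_range xs xs.length le_rfl, List.take_length]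
    have h2 : ∀ t ∈ List.range (q * xs.length + r),
        ((fun t => xs.getD (t % xs.length) "") ∘ (fun t => xs.length + t)) t
          = xs.getD (t % xs.length) "" := by
      intro t ht; simp [Nat.add_mod_left]
    rw [List.map_congr_left h2, ih]
    ring

theorem pv_count_range_mod (xs : List String) (R : Nat) (hpos : 0 < xs.length) (k : String) :
    ((List.range R).map (fun t => xs.getD (t % xs.length) "")).count k
      = R / xs.length * xs.count k + (xs.take (R % xs.length)).count k := by
  have h := pv_count_cycles xs (R / xs.length) (R % xs.length) (le_of_lt (Nat.mod_lt _ hpos)) k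
  rwa [Nat.div_add_mod'] at h

theorem pv_getD_foldl_insert_of_not_mem (l : List String) (f : String → Int)
    (d : PySem.Dict String Int) (k : String) (hk : k ∉ l) :
    (l.foldl (fun d x => d.insert x (f x)) d).getD k 0 = d.getD k 0 := by
  induction l generalizing d with
  | nil => rfl
  | cons x l ih =>
    simp only [List.mem_cons, not_or] at hk
    simp only [List.foldl_cons]
    rw [ih (d.insert x (f x)) hk.2]
    exact PySem.Dict.getD_insert_of_ne d (f x) 0 hk.1

theorem pv_getD_foldl_insert_fun (l : List String) (f : String → Int)
    (d : PySem.Dict String Int) (k : String) (hk : k ∈ l) :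
    (l.foldl (fun d x => d.insert x (f x)) d).getD k 0 = f k := by
  induction l generalizing d with
  | nil => cases hk
  | cons x l ih =>
    simp only [List.foldl_cons]
    by_cases h : k ∈ l
    · exact ih (d.insert x (f x)) h
    · have hx : k = x := by
        rcases List.mem_cons.mp hk with h1 | h1
        · exact h1
        · exact absurd h1 h
      rw [pv_getD_foldl_insert_of_not_mem l f _ k h, hx, PySem.Dict.getD_insert_self]

theorem pv_update_of_forall_mem (s : PySem.Set String) (l : List String) (h : ∀ x ∈ l, x ∈ s) :
    PySem.Set.update s l = s := by
  rw [PySem.Set.update_eq_append_filter]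
  have hnil : (PySem.Set.ofList l).filter (fun y => !(PySem.Set.contains s y)) = [] := by
    rw [List.filter_eq_nil_iff]
    intro y hy
    have hm : y ∈ s := h y (by rwa [PySem.Set.mem_ofList] at hy)
    simp [PySem.Set.contains_eq_listContains]
    exact hm
  rw [hnil, List.append_nil]

theorem pv_dicts_eq (pcs nsp : List String) (base rem : Int)
    (hrem : 0 < rem) (hnsp : nsp ≠ []) (hsub : ∀ x ∈ nsp, x ∈ pcs) :
    ((PySem.List.pyRange 0 rem 1).foldl (fun d i =>
        d.modify (PySem.List.pyGetD nsp (PySem.Int.mod i (PySem.List.len nsp)) "") 0 (· + 1))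
      (pcs.foldl (fun d pc => d.insert pc base) (PySem.Dict.empty : PySem.Dict String Int)))
    = pcs.foldl (fun d pc => d.insert pc
        (base + (PySem.Int.floordiv rem (PySem.List.len nsp)) * (PySem.List.count nsp pc : Int)
          + (PySem.List.count (PySem.List.slice nsp none
              (some (PySem.Int.mod rem (PySem.List.len nsp)))) pc : Int)))
        (PySem.Dict.empty : PySem.Dict String Int) := by
  set d0 : PySem.Dict String Int := pcs.foldl (fun d pc => d.insert pc base) PySem.Dict.empty with hd0
  have hN : 0 < nsp.length := List.length_pos_iff.mpr hnsp
  have hremR : rem = (rem.toNat : Int) := by omega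
  set valf : String → Int := fun pc =>
      base + (PySem.Int.floordiv rem (PySem.List.len nsp)) * (PySem.List.count nsp pc : Int)
        + (PySem.List.count (PySem.List.slice nsp none
            (some (PySem.Int.mod rem (PySem.List.len nsp)))) pc : Int) with hvalf
  have hkeys0 : d0.keys = PySem.Set.ofList pcs := by
    rw [hd0, PySem.Dict.keys_foldl_insert (f := fun _ _ => base)]
    rfl
  have hnodup0 : d0.keys.Nodup := by rw [hkeys0]; exact PySem.Set.nodup_ofList pcs
  set keyf : Int → String := fun i => PySem.List.pyGetD nsp (PySem.Int.mod i (PySem.List.len nsp)) "" with hkeyf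
  set dA : PySem.Dict String Int :=
    (PySem.List.pyRange 0 rem 1).foldl (fun d i => d.modify (keyf i) 0 (· + 1)) d0 with hdA
  set dB : PySem.Dict String Int :=
    pcs.foldl (fun d pc => d.insert pc (valf pc)) PySem.Dict.empty with hdB
  show dA = dB
  have hAmap : dA = ((PySem.List.pyRange 0 rem 1).map keyf).foldl
      (fun d x => d.modify x 0 (· + 1)) d0 := by rw [List.foldl_map]
  have hkeymem : ∀ i ∈ PySem.List.pyRange 0 rem 1, keyf i ∈ nsp := by
    intro i hi
    rw [PySem.List.mem_pyRange_one] at hi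
    apply PySem.List.pyGetD_mem
    simp only [PySem.List.len_eq]
    have h0 := PySem.Int.mod_nonneg i (b := (nsp.length : Int)) (by exact_mod_cast hN)
    have h1 := PySem.Int.mod_lt i (b := (nsp.length : Int)) (by exact_mod_cast hN)
    constructor <;> omega
  have hkeysA : dA.keys = PySem.Set.ofList pcs := by
    rw [hdA, PySem.Dict.keys_foldl_modify_key, hkeys0]
    exact pv_update_of_forall_mem _ _ (by
      intro x hx
      simp only [List.mem_map] at hx
      obtain ⟨i, hi, rfl⟩ := hx
      rw [PySem.Set.mem_ofList]
      exact hsub _ (hkeymem i hi))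
  have hkeysB : dB.keys = PySem.Set.ofList pcs := by
    rw [hdB, PySem.Dict.keys_foldl_insert (f := fun _ pc => valf pc)]
    rfl
  have hnodupA : dA.keys.Nodup := by rw [hkeysA]; exact PySem.Set.nodup_ofList pcs
  have hnodupB : dB.keys.Nodup := by rw [hkeysB]; exact PySem.Set.nodup_ofList pcs
  apply PySem.Dict.ext
  rw [PySem.Dict.items_eq_map_keys dA hnodupA 0, PySem.Dict.items_eq_map_keys dB hnodupB 0,
    hkeysA, hkeysB]
  apply List.map_congr_left
  intro k hk
  have hkpcs : k ∈ pcs := (PySem.Set.mem_ofList pcs k).mp hk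
  have hgA : dA.getD k 0 = base + (((PySem.List.pyRange 0 rem 1).map keyf).count k : Int) := by
    rw [hAmap, PySem.Dict.getD_foldl_modify_add_one, hd0,
      pv_getD_foldl_insert_fun pcs (fun _ => base) PySem.Dict.empty k hkpcs]
  have hgB : dB.getD k 0 = valf k := by
    rw [hdB, pv_getD_foldl_insert_fun pcs valf PySem.Dict.empty k hkpcs]
  have hcount : ((PySem.List.pyRange 0 rem 1).map keyf)
      = (List.range rem.toNat).map (fun t => nsp.getD (t % nsp.length) "") := by
    rw [PySem.List.pyRange_one, List.map_map]
    simp only [sub_zero]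
    apply List.map_congr_left
    intro t ht
    simp only [Function.comp_apply, hkeyf, zero_add, PySem.List.len_eq,
      PySem.Int.mod_natCast, PySem.List.pyGetD_natCast]
  show (k, dA.getD k 0) = (k, dB.getD k 0)
  congr 1
  rw [hgA, hgB, hcount, pv_count_range_mod nsp rem.toNat hN k, hvalf]
  simp only [PySem.List.len_eq, PySem.List.count_eq]
  rw [hremR, PySem.Int.floordiv_natCast, PySem.Int.mod_natCast,
    PySem.List.slice_to nsp (by positivity)]
  have h2 : (((rem.toNat : Int)) % ((nsp.length : Int))).toNat = rem.toNat % nsp.length := by omega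
  push_cast
  rw [h2]
  simp only [Int.toNat_natCast]
  ring

-- ===== VERDICT (by name: the statement is the Claim_ definition above) =====
theorem distribute_cameras_spec : Claim_equal_distribute_cameras := by
  unfold Claim_equal_distribute_cameras
  intro all_cameras pcs special_pc hdom hpre
  obtain ⟨hpcs, hcase⟩ := hpre
  unfold Spec_distribute_cameras
  simp only [distribute_cameras, distribute_cameras_alt]
  by_cases hrem : PySem.Int.mod (all_cameras.length : Int) (pcs.length : Int) = 0
  · simp [hrem, PySem.List.pyRange_one_eq_nil (le_refl (0 : Int))]
  · have hlen : 0 < pcs.length := List.length_pos_iff.mpr hpcs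
    have hrempos : 0 < PySem.Int.mod (all_cameras.length : Int) (pcs.length : Int) := by
      have h0 := PySem.Int.mod_nonneg (a := (all_cameras.length : Int))
        (b := (pcs.length : Int)) (by exact_mod_cast hlen)
      omega
    have hnsp : pcs.filter (fun pc => pc != special_pc) ≠ [] := hcase.resolve_left hrem
    rw [if_pos hrem]
    exact congrArg PySem.Dict.items
      (pv_dicts_eq pcs (pcs.filter (fun pc => pc != special_pc)) _ _ hrempos hnsp
        (fun x hx => (List.mem_filter.mp hx).1))
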